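-- pv_equiv track=rewrite | github.com/Lowz13/Algoritmos | Tarea 2/tarea2_RodriguezMedinaHumbertoOmar.py | get_aciertos
-- ===== SOURCE A (Python) =====
-- def get_aciertos(texto, diccionario):
--     """
--     Cuenta cuántas palabras del texto están en el diccionario
--     Args:
--         texto (str): Texto a analizar
--         diccionario (set): Conjunto de palabras válidas
--     Returns:
--         int: Número de palabras encontradas en el diccionario
--     """
--     aciertos = 0
--     palabra = ""
--     for c in texto:
--         if c in alfabeto:
--             palabra += c
--         else:
--             if palabra in diccionario:
--                 aciertos += 1
--             palabra = ""
--     # TODO: Separar el texto en palabras y contar las que están en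
--     # diccionario
--     # Normalizar a minúsculas para comparar
--
--     return aciertos
--
-- alfabeto = "abcdefghijklmnopqrstuvwxyz"
-- ===== SOURCE B (Python) =====
-- alfabeto = "abcdefghijklmnopqrstuvwxyz"
--
-- def get_aciertos(texto, diccionario):
--     # Tokenize first, then count: every letter run (possibly empty) that is
--     # terminated by a non-letter character is a word; the trailing run with no
--     # terminator is dropped (as in A).
--     normalized = "".join(c if c in alfabeto else "\n" for c in texto)
--     words = normalized.split("\n")[:-1]
--     return sum(1 for w in words if w in diccionario)
-- ===== Notes on version B (the rewrite author's own statement) =====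
-- stated objective: idiomatic
-- what changed: Replaced A's accumulate/reset state machine with a tokenize-then-count pipeline: normalize non-letters to a separator, split, drop the unterminated trailing piece, and sum dictionary membership over the token list.
import Mathlib
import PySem

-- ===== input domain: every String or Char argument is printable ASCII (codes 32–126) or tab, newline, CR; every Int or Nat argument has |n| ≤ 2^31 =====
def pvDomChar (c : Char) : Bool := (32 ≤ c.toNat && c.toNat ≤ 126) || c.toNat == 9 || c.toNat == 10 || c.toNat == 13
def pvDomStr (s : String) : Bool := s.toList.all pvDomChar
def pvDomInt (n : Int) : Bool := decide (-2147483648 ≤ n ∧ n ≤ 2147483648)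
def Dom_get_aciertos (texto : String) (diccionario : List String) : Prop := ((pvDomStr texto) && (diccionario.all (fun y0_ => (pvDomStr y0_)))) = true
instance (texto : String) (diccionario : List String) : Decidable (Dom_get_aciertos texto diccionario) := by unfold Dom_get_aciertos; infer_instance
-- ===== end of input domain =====

-- B tokenizes first (normalize non-letters to '\n', split, drop the trailing piece) and then
-- counts dictionary hits, replacing A's accumulate/reset state machine; objective: idiomatic.


-- module constant: alfabeto = "abcdefghijklmnopqrstuvwxyz" (single-char 'c in alfabeto' is char membership)
def pvAlfabeto : List Char := "abcdefghijklmnopqrstuvwxyz".toList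

-- ===== PORT A =====
-- one loop step of A: letters accumulate into palabra, any other char closes (and maybe counts) it
def pvStepA (diccionario : List String) (st : Int × List Char) (c : Char) : Int × List Char :=
  if pvAlfabeto.contains c then (st.1, st.2 ++ [c])
  else ((if diccionario.contains (String.mk st.2) then st.1 + 1 else st.1), [])

def get_aciertos (texto : String) (diccionario : List String) : Int :=
  (texto.toList.foldl (pvStepA diccionario) (0, [])).1

-- ===== PORT B =====
def get_aciertos_alt (texto : String) (diccionario : List String) : Int :=
  let normalized := texto.toList.map (fun c => if pvAlfabeto.contains c then c else '\n')
  let words := PySem.List.slice (PySem.Chars.splitOn normalized ['\n']) none (some (-1))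
  words.foldl (fun acc w => acc + (if diccionario.contains (String.mk w) then 1 else 0)) 0

-- ===== PRECONDITION & SPEC =====
def Spec_get_aciertos (texto : String) (diccionario : List String) (out : Int) : Prop := out = get_aciertos_alt texto diccionario
instance (texto : String) (diccionario : List String) (out : Int) : Decidable (Spec_get_aciertos texto diccionario out) := by unfold Spec_get_aciertos; infer_instance

-- ===== CLAIM (what is proved, stated in full; the proofs are below) =====
def Claim_equal_get_aciertos : Prop := ∀ (texto : String) (diccionario : List String), Dom_get_aciertos texto diccionario → Spec_get_aciertos texto diccionario (get_aciertos texto diccionario)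

-- ===== LEMMAS AND PROOFS =====

-- the completed words of cs when the pending partial word is p
def pvSegs (p : List Char) : List Char → List (List Char)
  | [] => []
  | c :: rest => if pvAlfabeto.contains c then pvSegs (p ++ [c]) rest else p :: pvSegs [] rest

-- what splitOn.go computes on a singleton '\n' separator (cur reversed, acc ignored)
def pvRes : List Char → List Char → List (List Char)
  | [], cur => [cur.reverse]
  | c :: rest, cur => if c = '\n' then cur.reverse :: pvRes rest [] else pvRes rest (c :: cur)

def pvHits (diccionario : List String) (ws : List (List Char)) : Int :=
  (ws.map (fun w => if diccionario.contains (String.mk w) then (1 : Int) else 0)).sum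

lemma pvFoldA (d : List String) (cs : List Char) (a : Int) (p : List Char) :
    (cs.foldl (pvStepA d) (a, p)).1 = a + pvHits d (pvSegs p cs) := by
  induction cs generalizing a p with
  | nil => simp [pvSegs, pvHits]
  | cons c rest ih =>
    simp only [List.foldl_cons, pvStepA, pvSegs]
    by_cases h : c ∈ pvAlfabeto
    · simp [h, ih]
    · simp only [List.contains_eq_mem, h, decide_false, Bool.false_eq_true, if_false]
      rw [ih]
      simp [pvHits]
      split <;> ring

lemma pvRes_ne_nil (l cur : List Char) : pvRes l cur ≠ [] := by
  induction l generalizing cur with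
  | nil => simp [pvRes]
  | cons c rest ih => by_cases h : c = '\n' <;> simp [pvRes, h, ih]

lemma pvGo_eq (fuel : Nat) (l cur : List Char) (acc : List (List Char)) (h : l.length < fuel) :
    PySem.Chars.splitOn.go ['\n'] fuel l cur acc = acc.reverse ++ pvRes l cur := by
  induction fuel generalizing l cur acc with
  | zero => omega
  | succ n ih =>
    cases l with
    | nil => simp [PySem.Chars.splitOn.go, pvRes]
    | cons c rest =>
      by_cases hc : c = '\n'
      · subst hc
        simp only [PySem.Chars.splitOn.go, List.isPrefixOf, beq_self_eq_true, Bool.true_and,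
          if_true, List.length_cons, List.drop_succ_cons, List.length_nil, List.drop_zero]
        rw [ih rest [] _ (by simp at h ⊢; omega)]
        simp [pvRes]
      · have hpre : (['\n'].isPrefixOf (c :: rest)) = false := by
          simp [List.isPrefixOf, Ne.symm hc]
        simp only [PySem.Chars.splitOn.go, hpre, Bool.false_eq_true, if_false]
        rw [ih rest (c :: cur) acc (by simp at h ⊢; omega)]
        simp [pvRes, hc]

lemma pvSplit_eq (cs : List Char) :
    PySem.Chars.splitOn cs ['\n'] = pvRes cs [] := by
  unfold PySem.Chars.splitOn
  rw [pvGo_eq _ _ _ _ (by omega)]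
  simp

lemma pvResSegs (cs : List Char) (cur : List Char) :
    (pvRes (cs.map (fun c => if pvAlfabeto.contains c then c else '\n')) cur).dropLast
      = pvSegs cur.reverse cs := by
  induction cs generalizing cur with
  | nil => simp [pvRes, pvSegs]
  | cons c rest ih =>
    simp only [List.map_cons, pvSegs]
    by_cases h : pvAlfabeto.contains c
    · have hnl : c ≠ '\n' := by
        intro he; subst he; revert h; decide
      have h' : c ∈ pvAlfabeto := by simpa using h
      simp only [List.contains_eq_mem, h', decide_true, if_true, pvRes, hnl, if_false]
      simpa using ih (c :: cur)
    · have h' : ¬ (c ∈ pvAlfabeto) := by simpa using h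
      simp only [List.contains_eq_mem, h', decide_false, Bool.false_eq_true, if_false, pvRes, if_true]
      rw [List.dropLast_cons_of_ne_nil (pvRes_ne_nil _ _)]
      have := ih []
      simpa using this

lemma pvFoldB (d : List String) (ws : List (List Char)) (a : Int) :
    ws.foldl (fun acc w => acc + (if d.contains (String.mk w) then 1 else 0)) a
      = a + pvHits d ws := by
  induction ws generalizing a with
  | nil => simp [pvHits]
  | cons w rest ih => simp only [List.foldl_cons]; rw [ih]; simp [pvHits]; ring

-- ===== VERDICT (by name: the statement is the Claim_ definition above) =====
theorem get_aciertos_spec : Claim_equal_get_aciertos := by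
  intro texto diccionario _
  show get_aciertos texto diccionario = get_aciertos_alt texto diccionario
  have hB : get_aciertos_alt texto diccionario
      = (PySem.List.slice
          (PySem.Chars.splitOn (texto.toList.map (fun c => if pvAlfabeto.contains c then c else '\n')) ['\n'])
          none (some (-1))).foldl
          (fun acc w => acc + (if diccionario.contains (String.mk w) then 1 else 0)) 0 := rfl
  rw [hB, pvSplit_eq, PySem.List.slice_to_neg_one, pvResSegs, pvFoldB]
  show (texto.toList.foldl (pvStepA diccionario) (0, [])).1 = _
  rw [pvFoldA]
  simp [List.reverse_nil]
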